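-- pv_equiv track=rewrite | github.com/RegentDmitry/LLM_Range_Tool | lib/buckets.py | sets_count
-- ===== SOURCE A (Python) =====
-- def paired(board_values):
--     board_list = list(board_values)
--     count = len(board_list)
--     for i in range(count):
--         for j in range(i + 1, count):
--             if board_list[i] == board_list[j]:
--                 return True
--     return False
--
-- def sets_count(hole_cards_values, board_values):
--     if paired(board_values):
--         return 0
--
--     hash_set = set()
--     pairs = set()
--     for h in hole_cards_values:
--         if h not in hash_set:
--             hash_set.add(h)
--         else:
--             pairs.add(h)
--
--     sets = 0
--     for b in board_values:
--         if b in pairs: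
--             sets += 1
--
--     return sets
-- ===== SOURCE B (Python) =====
-- def sets_count(hole_cards_values, board_values):
--     board = list(board_values)
--     if len(set(board)) != len(board):
--         return 0
--     counts = {}
--     for h in hole_cards_values:
--         counts[h] = counts.get(h, 0) + 1
--     return sum(1 for b in board if counts.get(b, 0) >= 2)
-- ===== Notes on version B (the rewrite author's own statement) =====
-- stated objective: simpler
-- what changed: Replaces the O(n^2) pairwise board scan with a set-cardinality duplicate check and replaces the two-set seen/pairs construction with a single count dictionary queried directly during one pass over the board.
import Mathlib
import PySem

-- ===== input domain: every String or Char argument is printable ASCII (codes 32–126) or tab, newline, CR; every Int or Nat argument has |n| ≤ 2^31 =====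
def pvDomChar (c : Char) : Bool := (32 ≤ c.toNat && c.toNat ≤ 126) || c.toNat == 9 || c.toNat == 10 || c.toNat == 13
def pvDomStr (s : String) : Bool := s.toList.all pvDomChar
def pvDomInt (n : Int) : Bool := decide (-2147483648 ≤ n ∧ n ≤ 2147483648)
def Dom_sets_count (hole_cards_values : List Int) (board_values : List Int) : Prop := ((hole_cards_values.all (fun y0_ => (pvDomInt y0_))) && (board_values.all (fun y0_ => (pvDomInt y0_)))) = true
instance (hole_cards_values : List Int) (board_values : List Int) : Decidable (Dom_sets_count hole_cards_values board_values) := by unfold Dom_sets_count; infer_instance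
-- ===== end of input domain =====

-- B replaces A's quadratic pairwise duplicate scan by a set-cardinality check and A's
-- two-set seen/pairs bookkeeping by a single count dictionary (objective: simpler).

-- ===== PORT A =====
-- paired: the nested i<j index scan compares each element against every later one,
-- returning True on the first equal pair; structurally that is this recursion.
def pairedA : List Int → Bool
  | [] => false
  | x :: xs => xs.contains x || pairedA xs

def sets_count (hole_cards_values : List Int) (board_values : List Int) : Int :=
  if pairedA board_values then 0
  else
    let st := hole_cards_values.foldl
      (fun (st : PySem.Set Int × PySem.Set Int) h =>
        if ¬ (PySem.Set.contains st.1 h = true) then (PySem.Set.add st.1 h, st.2)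
        else (st.1, PySem.Set.add st.2 h))
      (PySem.Set.empty, PySem.Set.empty)
    board_values.foldl
      (fun sets b => if PySem.Set.contains st.2 b = true then sets + 1 else sets) (0 : Int)

-- ===== PORT B =====
def sets_count_alt (hole_cards_values : List Int) (board_values : List Int) : Int :=
  let board := board_values
  if PySem.Set.len (PySem.Set.ofList board) ≠ board.length then 0
  else
    let counts := hole_cards_values.foldl
      (fun (d : PySem.Dict Int Int) h => d.insert h (d.getD h 0 + 1)) PySem.Dict.empty
    ((board.filter (fun b => decide (2 ≤ counts.getD b 0))).map (fun _ => (1 : Int))).sum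

-- ===== PRECONDITION & SPEC =====
def Spec_sets_count (hole_cards_values : List Int) (board_values : List Int) (out : Int) : Prop := out = sets_count_alt hole_cards_values board_values
instance (hole_cards_values : List Int) (board_values : List Int) (out : Int) : Decidable (Spec_sets_count hole_cards_values board_values out) := by unfold Spec_sets_count; infer_instance

-- ===== CLAIM (what is proved, stated in full; the proofs are below) =====
def Claim_equal_sets_count : Prop := ∀ (hole_cards_values : List Int) (board_values : List Int), Dom_sets_count hole_cards_values board_values → Spec_sets_count hole_cards_values board_values (sets_count hole_cards_values board_values)

-- ===== LEMMAS AND PROOFS =====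

theorem pairedA_eq_false_iff (xs : List Int) : pairedA xs = false ↔ xs.Nodup := by
  induction xs with
  | nil => simp [pairedA]
  | cons x t ih => simp [pairedA, List.nodup_cons, ih]

theorem ofList_length_eq_iff (xs : List Int) :
    PySem.Set.len (PySem.Set.ofList xs) = (xs.length : Int) ↔ xs.Nodup := by
  constructor
  · intro h
    have hperm : (PySem.Set.ofList xs).Perm xs.dedup :=
      (List.perm_ext_iff_of_nodup (PySem.Set.nodup_ofList xs) (List.nodup_dedup xs)).2
        (by intro a; simp [PySem.Set.mem_ofList, List.mem_dedup])
    have h1 : (PySem.Set.ofList xs).length = xs.length := by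
      simpa [PySem.Set.len] using h
    have hlen : xs.dedup.length = xs.length := by
      have := hperm.length_eq; omega
    exact List.dedup_eq_self.1 ((List.dedup_sublist xs).eq_of_length hlen)
  · intro h
    rw [PySem.Set.ofList_eq_self_of_nodup xs h]
    simp [PySem.Set.len]

theorem pairs_mem (l : List Int) (s p : PySem.Set Int) (b : Int) :
    (b ∈ (l.foldl (fun (st : PySem.Set Int × PySem.Set Int) h =>
        if ¬ (PySem.Set.contains st.1 h = true) then (PySem.Set.add st.1 h, st.2)
        else (st.1, PySem.Set.add st.2 h)) (s, p)).2)
    ↔ (b ∈ p ∨ (if b ∈ s then b ∈ l else 1 < l.count b)) := by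
  induction l generalizing s p with
  | nil => simp
  | cons h t ih =>
    simp only [List.foldl_cons]
    by_cases hsh : h ∈ s
    · rw [if_neg (by simpa [PySem.Set.contains, List.contains_eq_mem] using hsh)]
      rw [ih]
      by_cases hbh : b = h
      · subst hbh
        simp [PySem.Set.mem_add, hsh]
      · simp only [PySem.Set.mem_add]
        by_cases hbs : b ∈ s <;>
          simp [hbs, hbh, List.mem_cons, Ne.symm hbh]
    · rw [if_pos (by simpa [PySem.Set.contains, List.contains_eq_mem] using hsh)]
      rw [ih]
      by_cases hbh : b = h
      · subst hbh
        have hadd : b ∈ PySem.Set.add s b := by simp [PySem.Set.mem_add]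
        simp only [if_pos hadd, if_neg hsh, List.mem_cons, List.count_cons_self]
        constructor
        · rintro (hp | ht)
          · exact Or.inl hp
          · exact Or.inr (by have := List.count_pos_iff.2 ht; omega)
        · rintro (hp | hc)
          · exact Or.inl hp
          · exact Or.inr (List.count_pos_iff.1 (by omega))
      · have hadd : (b ∈ PySem.Set.add s h) ↔ b ∈ s := by
          simp [PySem.Set.mem_add, hbh]
        simp only [hadd]
        by_cases hbs : b ∈ s <;>
          simp [hbs, hbh, List.mem_cons, Ne.symm hbh]

theorem counts_getD (l : List Int) (b : Int) :
    (l.foldl (fun (d : PySem.Dict Int Int) h => d.insert h (d.getD h 0 + 1))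
      PySem.Dict.empty).getD b 0 = (l.count b : Int) := by
  simp [PySem.Dict.getD_foldl_insert_add_one]

theorem sum_ones_filter (q : Int → Bool) (l : List Int) :
    ((l.filter q).map (fun _ => (1 : Int))).sum = ((l.filter q).length : Int) := by
  induction l with
  | nil => simp
  | cons x t ih =>
    by_cases hx : q x = true
    · simp [List.filter_cons, hx, ih]
      omega
    · simp [List.filter_cons, hx, ih]

-- ===== VERDICT (by name: the statement is the Claim_ definition above) =====
theorem sets_count_spec : Claim_equal_sets_count := by
  intro hole board _
  show sets_count hole board = sets_count_alt hole board
  unfold sets_count sets_count_alt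
  by_cases hnd : board.Nodup
  · rw [if_neg (by simp [pairedA_eq_false_iff, hnd]),
      if_neg (fun hne => hne ((ofList_length_eq_iff board).2 hnd))]
    rw [PySem.List.foldl_if_add_one, sum_ones_filter]
    rw [← List.countP_eq_length_filter]
    have hcong : List.countP
        (fun b => PySem.Set.contains (hole.foldl (fun (st : PySem.Set Int × PySem.Set Int) h =>
          if ¬ (PySem.Set.contains st.1 h = true) then (PySem.Set.add st.1 h, st.2)
          else (st.1, PySem.Set.add st.2 h)) (PySem.Set.empty, PySem.Set.empty)).2 b) board
        = List.countP (fun b =>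
        decide (2 ≤ (hole.foldl (fun (d : PySem.Dict Int Int) h =>
          d.insert h (d.getD h 0 + 1)) PySem.Dict.empty).getD b 0)) board := by
      apply List.countP_congr
      intro b _
      simp only [PySem.Set.contains, List.contains_eq_mem, decide_eq_true_eq]
      rw [counts_getD]
      have h1 := pairs_mem hole PySem.Set.empty PySem.Set.empty b
      simp only [PySem.Set.contains, List.contains_eq_mem, decide_eq_true_eq] at h1
      rw [h1]
      simp only [PySem.Set.empty, List.not_mem_nil, false_or, if_false]
      constructor <;> intro h2 <;> omega
    rw [hcong, zero_add]
  · rw [if_pos (by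
      cases hp : pairedA board with
      | true => rfl
      | false => exact absurd ((pairedA_eq_false_iff board).1 hp) hnd),
      if_pos (fun hlen => hnd ((ofList_length_eq_iff board).1 hlen))]
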